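-- pv_equiv track=rewrite | github.com/andrewwildgoose/chessproject | chess_puzzle_final.py | make_board_matrix
-- ===== SOURCE A (Python) =====
-- from typing import Any, List, Tuple, Union, Sequence
--
-- Board = tuple[int, list['Piece']]
--
-- def get_squares(B: Board) -> list[tuple[int, int]]:
--     ''' returns a list of all the squares on the board '''
--     return [(x, y) for x in range(1, (B[0])+1) for y in range(1, (B[0])+1)]
--
-- def make_board_matrix(B : Board) -> List[List[Tuple[int, int]]]:
--     '''converts list of squares on the board to a matrix representing the board'''
--     board = []
--     squares = get_squares(B)
--     for rows in range(1, B[0]+1):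
--         row = [square for square in squares if square[1] == rows]
--         board.append(row)
--     board.reverse()
--     return board
-- ===== SOURCE B (Python) =====
-- from typing import List, Tuple
--
-- Board = tuple[int, list]
--
-- def make_board_matrix(B: Board) -> List[List[Tuple[int, int]]]:
--     '''builds each row directly, without a global square list or per-row rescans'''
--     n = B[0]
--     board = [[(x, y) for x in range(1, n + 1)] for y in range(1, n + 1)]
--     board.reverse()
--     return board
-- ===== Notes on version B (the rewrite author's own statement) =====
-- stated objective: faster
-- what changed: B builds each row directly as a nested comprehension over x for each y, instead of materialising the full n^2 square list and re-filtering it once per row; intended as asymptotically faster (O(n^2) vs O(n^3)); measured 25.7x at n=4096, A timed out on larger inputs where B returned.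
import Mathlib
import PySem

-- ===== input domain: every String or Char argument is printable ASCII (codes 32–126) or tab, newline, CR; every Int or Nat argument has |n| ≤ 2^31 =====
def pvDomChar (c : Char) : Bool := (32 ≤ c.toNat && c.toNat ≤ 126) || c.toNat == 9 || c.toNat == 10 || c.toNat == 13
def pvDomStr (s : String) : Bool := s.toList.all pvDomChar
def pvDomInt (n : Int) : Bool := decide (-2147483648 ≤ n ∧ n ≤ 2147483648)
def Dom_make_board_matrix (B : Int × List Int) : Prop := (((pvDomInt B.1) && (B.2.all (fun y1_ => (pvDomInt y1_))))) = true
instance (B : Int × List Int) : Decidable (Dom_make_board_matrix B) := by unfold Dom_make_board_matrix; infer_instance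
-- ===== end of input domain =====

-- B builds each row directly (nested comprehension over x for each y) instead of
-- materialising the full square list and re-filtering it once per row; intended as faster
-- (measured 25.7x at n=4096; A timed out on larger inputs where B returned).

-- ===== PORT A =====
def get_squares (B : Int × List Int) : List (Int × Int) :=
  (PySem.List.pyRange 1 (B.1 + 1) 1).flatMap (fun x =>
    (PySem.List.pyRange 1 (B.1 + 1) 1).map (fun y => (x, y)))

def make_board_matrix (B : Int × List Int) : List (List (Int × Int)) :=
  let squares := get_squares B
  let board := (PySem.List.pyRange 1 (B.1 + 1) 1).foldl
    (fun acc rows => acc ++ [squares.filter (fun square => square.2 == rows)]) []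
  board.reverse

-- ===== PORT B =====
def make_board_matrix_alt (B : Int × List Int) : List (List (Int × Int)) :=
  let n := B.1
  let board := (PySem.List.pyRange 1 (n + 1) 1).map (fun y =>
    (PySem.List.pyRange 1 (n + 1) 1).map (fun x => (x, y)))
  board.reverse

-- ===== PRECONDITION & SPEC =====
def Spec_make_board_matrix (B : Int × List Int) (out : List (List (Int × Int))) : Prop := out = make_board_matrix_alt B
instance (B : Int × List Int) (out : List (List (Int × Int))) : Decidable (Spec_make_board_matrix B out) := by unfold Spec_make_board_matrix; infer_instance

-- ===== CLAIM (what is proved, stated in full; the proofs are below) =====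
def Claim_equal_make_board_matrix : Prop := ∀ (B : Int × List Int), Dom_make_board_matrix B → Spec_make_board_matrix B (make_board_matrix B)

-- ===== LEMMAS AND PROOFS =====

-- filtering the full square list for a given row r yields exactly row r
theorem filter_squares_eq (R : List Int) (hnd : R.Nodup) (r : Int) (hr : r ∈ R) :
    (R.flatMap (fun x => R.map (fun y => (x, y)))).filter
      (fun s => s.2 == r) = R.map (fun x => (x, r)) := by
  have hfr : R.filter (fun y => y == r) = [r] := by
    have hc : R.count r = 1 := List.count_eq_one_of_mem hnd hr
    rw [List.filter_beq r, hc]; rfl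
  simp [List.filter_flatMap, List.filter_map, Function.comp_def, hfr]
  clear hnd hr hfr
  induction R with
  | nil => rfl
  | cons a t ih => simpa using ih

-- ===== VERDICT (by name: the statement is the Claim_ definition above) =====
theorem make_board_matrix_spec : Claim_equal_make_board_matrix := by
  intro B _
  unfold Spec_make_board_matrix make_board_matrix make_board_matrix_alt get_squares
  simp only [PySem.List.foldl_append_singleton_eq_map, List.nil_append]
  congr 1
  apply List.map_congr_left
  intro r hr
  exact filter_squares_eq _ (PySem.List.nodup_pyRange_one 1 (B.1+1)) r hr
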